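-- pv_equiv track=rewrite | github.com/cinnamonbacon/Small-projects | advent2022-1.py | insertelf
-- ===== SOURCE A (Python) =====
-- def insertelf(elf,arr):
--     for i in range(3):
--         if(elf<arr[i]):
--             break
--         elif(elf<arr[i]):
--             arr[i-1]=elf
--         else:
--             if(i!=0):
--                 arr[i-1]=arr[i]
--             arr[i]=elf
--
--     return arr
-- ===== SOURCE B (Python) =====
-- def insertelf(elf, arr):
--     # Find the first of the three slots whose value exceeds elf, then do one shift.
--     # Mutates arr in place, like the original.
--     pos = 0
--     while pos < 3 and arr[pos] <= elf:
--         pos += 1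
--     if pos:
--         arr[:pos] = arr[1:pos] + [elf]
--     return arr
-- ===== Notes on version B (the rewrite author's own statement) =====
-- stated objective: simpler
-- what changed: Replaces the per-iteration branch cascade (break / dead elif / shift-and-store inside a for loop) by a two-phase algorithm: a scan that finds the insertion position among the first three slots, followed by a single slice-assignment shift; same in-place mutation of arr.
import Mathlib
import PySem

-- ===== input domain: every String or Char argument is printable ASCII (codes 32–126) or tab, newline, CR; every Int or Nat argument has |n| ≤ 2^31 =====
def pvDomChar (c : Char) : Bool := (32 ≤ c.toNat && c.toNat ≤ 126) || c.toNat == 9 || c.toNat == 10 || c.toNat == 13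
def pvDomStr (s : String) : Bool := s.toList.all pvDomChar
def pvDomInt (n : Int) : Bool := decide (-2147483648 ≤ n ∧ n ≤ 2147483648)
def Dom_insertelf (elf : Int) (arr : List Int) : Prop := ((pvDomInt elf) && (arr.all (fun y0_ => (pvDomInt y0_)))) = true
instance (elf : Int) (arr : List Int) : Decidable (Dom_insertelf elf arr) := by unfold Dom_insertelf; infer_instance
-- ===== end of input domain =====

-- B replaces A's per-iteration branch cascade by "find the insertion position, then one shift";
-- both mutate arr in place in Python, the equivalence proved here is about the returned value.

-- ===== PORT A =====
-- the for loop over range(3), state = arr; none = IndexError (excluded by Pre_)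
def insertelfLoopA (elf : Int) : List Nat → List Int → Option (List Int)
  | [], arr => some arr
  | i :: is, arr =>
    match PySem.List.pyGet? arr (i : Int) with
    | none => none
    | some v =>
      if elf < v then some arr                 -- break
      else if elf < v then                     -- (unreachable elif, kept from A)
        insertelfLoopA elf is (arr.set (i - 1) elf)
      else
        insertelfLoopA elf is ((if i ≠ 0 then arr.set (i - 1) v else arr).set i elf)

def insertelf (elf : Int) (arr : List Int) : List Int :=
  (insertelfLoopA elf [0, 1, 2] arr).getD arr

-- ===== PORT B =====
-- the while loop: first pos < 3 with elf < arr[pos]; fuel = 3 - pos; none = IndexError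
def insertelfScanB (elf : Int) (arr : List Int) : Nat → Nat → Option Nat
  | 0, pos => some pos
  | k + 1, pos =>
    match PySem.List.pyGet? arr (pos : Int) with
    | none => none
    | some v => if v ≤ elf then insertelfScanB elf arr k (pos + 1) else some pos

def insertelf_alt (elf : Int) (arr : List Int) : List Int :=
  match insertelfScanB elf arr 3 0 with
  | none => arr
  | some pos =>
    if pos = 0 then arr
    else (PySem.List.slice arr (some 1) (some (pos : Int)) ++ [elf]) ++ arr.drop pos

-- ===== PRECONDITION & SPEC =====
-- Pre_ excludes exactly the inputs where A raises IndexError: fewer than 3 elements and the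
-- scan of the first slots does not stop before running off the end.
def Pre_insertelf (elf : Int) (arr : List Int) : Prop :=
  3 ≤ arr.length ∨ (1 ≤ arr.length ∧ elf < arr.getD 0 0) ∨ (2 ≤ arr.length ∧ elf < arr.getD 1 0)
instance (elf : Int) (arr : List Int) : Decidable (Pre_insertelf elf arr) := by
  unfold Pre_insertelf; infer_instance

def pvWitness_insertelf : Int × List Int := (4, [1, 2, 3])

def Spec_insertelf (elf : Int) (arr : List Int) (out : List Int) : Prop := out = insertelf_alt elf arr
instance (elf : Int) (arr : List Int) (out : List Int) : Decidable (Spec_insertelf elf arr out) := by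
  unfold Spec_insertelf; infer_instance

-- ===== CLAIM (what is proved, stated in full; the proofs are below) =====
def Claim_equal_insertelf : Prop :=
  ∀ (elf : Int) (arr : List Int), Dom_insertelf elf arr → Pre_insertelf elf arr →
    Spec_insertelf elf arr (insertelf elf arr)

-- ===== LEMMAS AND PROOFS =====

theorem pvGet1 {a : Type} (x y : a) (xs : List a) : PySem.List.pyGet? (x :: y :: xs) 1 = some y := by
  simp

theorem pvGet2 {a : Type} (x y z : a) (xs : List a) :
    PySem.List.pyGet? (x :: y :: z :: xs) 2 = some z := by
  have h := PySem.List.pyGet?_natCast (xs := x :: y :: z :: xs) (n := 2)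
  simpa using h

theorem pvSlice11 {a : Type} (xs : List a) :
    PySem.List.slice xs (some 1) (some 1) = [] := by
  have h := PySem.List.slice_natCast (xs := xs) (a := 1) (b := 1)
  simpa using h

theorem pvSlice12 {a : Type} (x y : a) (xs : List a) :
    PySem.List.slice (x :: y :: xs) (some 1) (some 2) = [y] := by
  have h := PySem.List.slice_natCast (xs := x :: y :: xs) (a := 1) (b := 2)
  simpa using h

theorem pvSlice13 {a : Type} (x y z : a) (xs : List a) :
    PySem.List.slice (x :: y :: z :: xs) (some 1) (some 3) = [y, z] := by
  have h := PySem.List.slice_natCast (xs := x :: y :: z :: xs) (a := 1) (b := 3)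
  simpa using h

-- ===== VERDICT (by name: the statement is the Claim_ definition above) =====
theorem insertelf_spec : Claim_equal_insertelf := by
  intro elf arr _ hpre
  unfold Spec_insertelf
  match arr with
  | [] => simp [Pre_insertelf] at hpre
  | [a0] =>
    have h0 : elf < a0 := by simpa [Pre_insertelf] using hpre
    simp [insertelf, insertelf_alt, insertelfLoopA, insertelfScanB,
      h0, not_le.mpr h0]
  | [a0, a1] =>
    have h1 : elf < a0 ∨ elf < a1 := by
      rcases hpre with h | ⟨_, h⟩ | ⟨_, h⟩ <;> simp_all
    by_cases h0 : elf < a0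
    · simp [insertelf, insertelf_alt, insertelfLoopA, insertelfScanB,
        h0, not_le.mpr h0]
    · have hb : elf < a1 := h1.resolve_left h0
      simp [insertelf, insertelf_alt, insertelfLoopA, insertelfScanB,
        pvSlice11, h0, not_lt.mp h0, hb, not_le.mpr hb]
  | a0 :: a1 :: a2 :: rest =>
    by_cases h0 : elf < a0
    · simp [insertelf, insertelf_alt, insertelfLoopA, insertelfScanB,
        h0, not_le.mpr h0]
    · have h0' : a0 ≤ elf := not_lt.mp h0
      by_cases h1 : elf < a1
      · simp [insertelf, insertelf_alt, insertelfLoopA, insertelfScanB,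
          pvGet1, pvSlice11, h0, h0', h1, not_le.mpr h1]
      · have h1' : a1 ≤ elf := not_lt.mp h1
        by_cases h2 : elf < a2
        · simp [insertelf, insertelf_alt, insertelfLoopA, insertelfScanB,
            pvGet1, pvGet2, pvSlice12, List.set,
            h0, h0', h1, h1', h2, not_le.mpr h2]
        · have h2' : a2 ≤ elf := not_lt.mp h2
          simp [insertelf, insertelf_alt, insertelfLoopA, insertelfScanB,
            pvGet1, pvGet2, pvSlice13, List.set,
            h0, h0', h1, h1', h2, h2']
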